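-- pv_equiv track=rewrite | github.com/LostGeorge/SmarterCache | SmarterCache/pca.py | get_next_access_dist
-- ===== SOURCE A (Python) =====
-- from collections import deque
--
-- def get_next_access_dist(id_ser, dummy_length):
--
--     reverse_data = deque()
--     next_access_dist = []
--     next_access_time = {}
--
--     for req in id_ser:
--         reverse_data.appendleft(req)
--
--     for index, req in enumerate(reverse_data):
--         if req in next_access_time:
--             next_access_dist.append(index - next_access_time[req])
--         else:
--             next_access_dist.append(dummy_length)
--         next_access_time[req] = index
--
--     next_access_dist.reverse()
--     return next_access_dist
-- ===== SOURCE B (Python) =====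
-- def next_occurrence(tail, req, dummy):
--     # distance (1-based within tail) to the first occurrence of req, or dummy
--     for k, x in enumerate(tail):
--         if x == req:
--             return k + 1
--     return dummy
--
-- def get_next_access_dist(id_ser, dummy_length):
--     # Direct definition: for each position, scan forward for the next access.
--     return [next_occurrence(id_ser[i + 1:], req, dummy_length)
--             for i, req in enumerate(id_ser)]
-- ===== Notes on version B (the rewrite author's own statement) =====
-- stated objective: simpler
-- what changed: Replaces A's reversed-deque construction, backward dict-driven pass and final list reversal with the direct definition: a comprehension that, for each position, scans the remaining suffix for the next occurrence of the same id (no dict, no deque, no reversals), trading A's linear time for a plainly spec-like quadratic scan.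
import Mathlib
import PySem

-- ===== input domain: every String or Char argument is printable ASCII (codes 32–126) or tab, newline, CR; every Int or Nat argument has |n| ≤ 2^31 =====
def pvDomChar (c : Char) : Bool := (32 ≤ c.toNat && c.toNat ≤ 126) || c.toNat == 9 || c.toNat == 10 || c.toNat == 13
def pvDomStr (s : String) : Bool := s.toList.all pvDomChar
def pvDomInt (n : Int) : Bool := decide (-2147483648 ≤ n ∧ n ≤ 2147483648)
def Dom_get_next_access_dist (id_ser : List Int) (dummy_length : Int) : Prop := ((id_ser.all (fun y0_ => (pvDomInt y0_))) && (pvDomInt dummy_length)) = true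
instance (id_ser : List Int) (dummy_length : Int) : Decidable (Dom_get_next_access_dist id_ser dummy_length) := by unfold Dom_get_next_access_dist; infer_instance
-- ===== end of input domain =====

-- B replaces A's reversed deque + backward dict pass + final reversal by the direct
-- definition: for each position, scan the remaining suffix for the next occurrence
-- (objective: simpler — no dict, no deque, no reversals; B is quadratic where A is linear).

-- ===== PORT A =====
-- literal port of A: build reverse_data by appendleft, scan it with a last-seen dict, reverse the result
def get_next_access_dist (id_ser : List Int) (dummy_length : Int) : List Int :=
  let reverse_data := id_ser.foldl (fun acc req => req :: acc) []
  let st := (PySem.List.enumerate reverse_data).foldl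
    (fun (st : List Int × PySem.Dict Int Int) p =>
      let next_access_dist :=
        match st.2.get? p.2 with
        | some t => st.1 ++ [p.1 - t]
        | none   => st.1 ++ [dummy_length]
      (next_access_dist, st.2.insert p.2 p.1))
    ([], PySem.Dict.empty)
  st.1.reverse

-- ===== PORT B =====
-- literal port of Source B's helper: the for-loop over enumerate(tail) with early return,
-- written as the obvious structural recursion over the enumerated list
def nextOccAux (req dummy : Int) : List (Int × Int) → Int
  | [] => dummy
  | p :: rest => if p.2 = req then p.1 + 1 else nextOccAux req dummy rest

def nextOccurrence (tail : List Int) (req dummy : Int) : Int :=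
  nextOccAux req dummy (PySem.List.enumerate tail)

-- literal port of Source B: comprehension over enumerate(id_ser), scanning the slice id_ser[i+1:]
def get_next_access_dist_alt (id_ser : List Int) (dummy_length : Int) : List Int :=
  (PySem.List.enumerate id_ser).map (fun p =>
    nextOccurrence (PySem.List.slice id_ser (some (p.1 + 1)) none) p.2 dummy_length)

-- ===== PRECONDITION & SPEC =====
def Spec_get_next_access_dist (id_ser : List Int) (dummy_length : Int) (out : List Int) : Prop := out = get_next_access_dist_alt id_ser dummy_length
instance (id_ser : List Int) (dummy_length : Int) (out : List Int) : Decidable (Spec_get_next_access_dist id_ser dummy_length out) := by unfold Spec_get_next_access_dist; infer_instance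

-- ===== CLAIM (what is proved, stated in full; the proofs are below) =====
def Claim_equal_get_next_access_dist : Prop := ∀ (id_ser : List Int) (dummy_length : Int), Dom_get_next_access_dist id_ser dummy_length → Spec_get_next_access_dist id_ser dummy_length (get_next_access_dist id_ser dummy_length)

-- ===== LEMMAS AND PROOFS =====

-- index of the first occurrence of v in the list, if any
def firstIdx : List Int → Int → Option Nat
  | [], _ => none
  | x :: xs, v => if x = v then some 0 else (firstIdx xs v).map (· + 1)

-- index of the last occurrence of v in the list, if any
def lastIdx : List Int → Int → Option Nat
  | [], _ => none
  | x :: xs, v =>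
    match lastIdx xs v with
    | some t => some (t + 1)
    | none => if x = v then some 0 else none

-- the common specification: distance from each position to the next occurrence of its value
def nextList (d : Int) : List Int → List Int
  | [] => []
  | x :: xs => (match firstIdx xs x with | some k => (k : Int) + 1 | none => d) :: nextList d xs

theorem firstIdx_lt {q : List Int} {v : Int} {m : Nat} (h : firstIdx q v = some m) : m < q.length := by
  induction q generalizing m with
  | nil => simp [firstIdx] at h
  | cons x xs ih =>
    simp only [firstIdx] at h
    split at h
    · simp at h; simp [List.length_cons]; omega
    · cases hx : firstIdx xs v with
      | none => simp [hx] at h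
      | some t =>
        simp [hx] at h
        have ht := ih hx
        simp [List.length_cons]; omega

theorem lastIdx_append_single (p : List Int) (y v : Int) :
    lastIdx (p ++ [y]) v = if y = v then some p.length else lastIdx p v := by
  induction p with
  | nil => simp [lastIdx]
  | cons x xs ih =>
    simp only [List.cons_append, lastIdx, ih]
    by_cases hy : y = v
    · simp [hy]
    · simp [hy]

theorem lastIdx_reverse (q : List Int) (v : Int) :
    lastIdx q.reverse v = (firstIdx q v).map (fun m => q.length - 1 - m) := by
  induction q with
  | nil => simp [lastIdx, firstIdx]
  | cons x xs ih =>
    simp only [List.reverse_cons, lastIdx_append_single, firstIdx, ih]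
    by_cases hx : x = v
    · simp [hx, List.length_reverse]
    · simp only [hx, if_false, List.length_reverse]
      cases hm : firstIdx xs v with
      | none => simp
      | some m =>
        have := firstIdx_lt hm
        simp only [Option.map_some, List.length_cons]
        congr 1
        omega

theorem nextList_length (d : Int) (xs : List Int) : (nextList d xs).length = xs.length := by
  induction xs with
  | nil => simp [nextList]
  | cons x xs ih => simp [nextList, ih]

theorem nextList_getElem (d : Int) (xs : List Int) (i : Nat) (h : i < xs.length)
    (h' : i < (nextList d xs).length) :
    (nextList d xs)[i] =
      (match firstIdx (xs.drop (i + 1)) xs[i] with | some k => (k : Int) + 1 | none => d) := by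
  induction xs generalizing i with
  | nil => simp at h
  | cons x xs ih =>
    cases i with
    | zero => simp [nextList]
    | succ j =>
      simp only [nextList, List.getElem_cons_succ, List.drop_succ_cons]
      have hj : j < xs.length := by simp [List.length_cons] at h; omega
      exact ih j hj (by rw [nextList_length]; exact hj)

-- ---------- A side ----------

-- the backward scan as a prefix-passing recursion
def prevTail (d : Int) : List Int → List Int → List Int
  | _, [] => []
  | p, y :: ys =>
    (match lastIdx p y with | some t => ((p.length : Int) - t) | none => d) :: prevTail d (p ++ [y]) ys

theorem prevTail_length (d : Int) (p ys : List Int) : (prevTail d p ys).length = ys.length := by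
  induction ys generalizing p with
  | nil => simp [prevTail]
  | cons y ys ih => simp [prevTail, ih]

theorem prevTail_getElem (d : Int) (ys p : List Int) (m : Nat) (h : m < ys.length)
    (h' : m < (prevTail d p ys).length) :
    (prevTail d p ys)[m] =
      (match lastIdx (p ++ ys.take m) ys[m] with
        | some t => ((p.length + m : Nat) : Int) - t | none => d) := by
  induction ys generalizing p m with
  | nil => simp at h
  | cons y ys ih =>
    cases m with
    | zero => simp [prevTail]
    | succ j =>
      simp only [prevTail, List.getElem_cons_succ, List.take_succ_cons]
      have hj : j < ys.length := by simp [List.length_cons] at h; omega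
      rw [ih (p ++ [y]) j hj (by rw [prevTail_length]; exact hj)]
      have hl : (p ++ [y]).length + j = p.length + (j + 1) := by simp; omega
      rw [List.append_assoc, List.singleton_append, hl]

theorem foldl_cons_rev (l acc : List Int) :
    l.foldl (fun a x => x :: a) acc = l.reverse ++ acc := by
  induction l generalizing acc with
  | nil => simp
  | cons x xs ih => simp [List.foldl_cons, ih]

theorem foldA (d : Int) (ys : List Int) : ∀ (p dist : List Int) (nat : PySem.Dict Int Int),
    (∀ v, nat.get? v = (lastIdx p v).map Int.ofNat) →
    ((PySem.List.enumerate ys (p.length : Int)).foldl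
      (fun (st : List Int × PySem.Dict Int Int) q =>
        (match st.2.get? q.2 with
          | some t => st.1 ++ [q.1 - t]
          | none   => st.1 ++ [d],
         st.2.insert q.2 q.1))
      (dist, nat)).1 = dist ++ prevTail d p ys := by
  induction ys with
  | nil => intro p dist nat h; simp [prevTail, PySem.List.enumerate]
  | cons y ys ih =>
    intro p dist nat h
    rw [PySem.List.enumerate_cons, List.foldl_cons]
    have hins : ∀ v, (nat.insert y ((p.length : Nat) : Int)).get? v
        = (lastIdx (p ++ [y]) v).map Int.ofNat := by
      intro v
      rw [PySem.Dict.get?_insert, lastIdx_append_single]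
      by_cases hv : v = y
      · simp [hv]
      · have : ¬ (y = v) := fun e => hv e.symm
        simp [hv, this, h v]
    have hlen : (p.length : Int) + 1 = (((p ++ [y]).length : Nat) : Int) := by simp
    cases hL : lastIdx p y with
    | some t =>
      simp only [h y, hL, Option.map_some]
      rw [hlen, ih (p ++ [y]) (dist ++ [(p.length : Int) - Int.ofNat t]) _ hins]
      simp [prevTail, hL, List.append_assoc]
    | none =>
      simp only [h y, hL, Option.map_none]
      rw [hlen, ih (p ++ [y]) (dist ++ [d]) _ hins]
      simp [prevTail, hL, List.append_assoc]

theorem empty_inv : ∀ v : Int, (PySem.Dict.empty : PySem.Dict Int Int).get? v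
    = (lastIdx [] v).map Int.ofNat := by
  intro v; simp [lastIdx, PySem.Dict.empty, PySem.Dict.get?]

theorem getElem_idx_congr (l : List Int) (a b : Nat) (ha : a < l.length) (hb : b < l.length)
    (he : a = b) : l[a] = l[b] := by subst he; rfl

theorem prevTail_rev_elem (xs : List Int) (d : Int) (i : Nat) (hi : i < xs.length)
    (hh : i < (prevTail d [] xs.reverse).reverse.length) (hh2 : i < (nextList d xs).length) :
    (prevTail d [] xs.reverse).reverse[i] = (nextList d xs)[i] := by
  have hlen : (prevTail d [] xs.reverse).length = xs.length := by
    rw [prevTail_length, List.length_reverse]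
  rw [List.getElem_reverse]
  simp only [hlen]
  have hm1 : xs.length - 1 - i < xs.reverse.length := by simp; omega
  have hm2 : xs.length - 1 - i < (prevTail d [] xs.reverse).length := by rw [hlen]; omega
  rw [prevTail_getElem d xs.reverse [] (xs.length - 1 - i) hm1 hm2]
  have hxm : xs.reverse[xs.length - 1 - i]'hm1 = xs[i] := by
    rw [List.getElem_reverse]
    exact getElem_idx_congr xs _ i (by omega) hi (by omega)
  have hdrop : xs.length - (xs.length - 1 - i) = i + 1 := by omega
  rw [List.take_reverse, hdrop] at *
  simp only [List.nil_append, List.length_nil, Nat.zero_add, hxm]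
  rw [lastIdx_reverse, nextList_getElem d xs i hi hh2]
  cases hF : firstIdx (xs.drop (i + 1)) xs[i] with
  | some k =>
    have hk := firstIdx_lt hF
    simp only [Option.map_some]
    simp only [List.length_drop] at hk ⊢
    have e1 : xs.length - 1 - i = (xs.length - (i + 1) - 1 - k) + (k + 1) := by omega
    rw [e1]
    push_cast
    ring
  | none => simp

theorem a_eq_nextList (xs : List Int) (d : Int) :
    get_next_access_dist xs d = nextList d xs := by
  have hF := foldA d xs.reverse [] [] PySem.Dict.empty empty_inv
  simp only [List.length_nil, Nat.cast_zero] at hF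
  simp only [get_next_access_dist, foldl_cons_rev, List.append_nil]
  rw [hF]
  simp only [List.nil_append]
  apply List.ext_getElem
  · simp [prevTail_length, nextList_length]
  · intro i h1 h2
    have hi : i < xs.length := by
      simpa [prevTail_length] using h1
    exact prevTail_rev_elem xs d i hi h1 h2

-- ---------- B side ----------

theorem nextOccAux_enumerate (req d : Int) (t : List Int) (s : Nat) :
    nextOccAux req d (PySem.List.enumerate t (s : Int)) =
      (match firstIdx t req with | some m => ((s + m : Nat) : Int) + 1 | none => d) := by
  induction t generalizing s with
  | nil => simp [PySem.List.enumerate, nextOccAux, firstIdx]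
  | cons x xs ih =>
    rw [PySem.List.enumerate_cons]
    simp only [nextOccAux, firstIdx]
    by_cases hx : x = req
    · simp [hx]
    · have hs : ((s : Int) + 1) = (((s + 1 : Nat)) : Int) := by push_cast; ring
      rw [if_neg hx, if_neg hx, hs, ih (s + 1)]
      cases hm : firstIdx xs req with
      | none => simp
      | some m =>
        simp only [Option.map_some]
        congr 1
        push_cast
        ring

theorem b_eq_nextList (xs : List Int) (d : Int) :
    get_next_access_dist_alt xs d = nextList d xs := by
  simp only [get_next_access_dist_alt]
  apply List.ext_getElem
  · simp [PySem.List.length_enumerate, nextList_length]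
  · intro i h1 h2
    have hi : i < xs.length := by
      simpa [PySem.List.length_enumerate] using h1
    have hi' : i < (PySem.List.enumerate xs).length := by
      simpa [PySem.List.length_enumerate] using hi
    rw [List.getElem_map, PySem.List.getElem_enumerate]
    simp only [nextOccurrence]
    have hslice : PySem.List.slice xs (some ((0 : Int) + (i : Nat) + 1)) none = xs.drop (i + 1) := by
      have : ((0 : Int) + (i : Nat) + 1) = (((i + 1 : Nat)) : Int) := by push_cast; ring
      rw [this, PySem.List.slice_from_natCast]
    have hh := nextOccAux_enumerate xs[i] d (xs.drop (i + 1)) 0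
    rw [Nat.cast_zero] at hh
    rw [hslice, hh]
    rw [nextList_getElem d xs i hi h2]
    cases hF : firstIdx (xs.drop (i + 1)) xs[i] with
    | some m => simp
    | none => simp

-- ===== VERDICT (by name: the statement is the Claim_ definition above) =====
theorem get_next_access_dist_spec : Claim_equal_get_next_access_dist := by
  intro id_ser dummy_length _
  unfold Spec_get_next_access_dist
  rw [a_eq_nextList, b_eq_nextList]
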